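-- pv_equiv track=rewrite | github.com/shatianming5/Dentist | scripts/run_raw_cls_kfold.py | normalize_extra_features
-- ===== SOURCE A (Python) =====
-- def parse_str_list(text: str) -> list[str]:
--     s = str(text or "").strip()
--     if not s:
--         return []
--     return [p.strip() for p in s.split(",") if p.strip()]
--
-- def normalize_extra_features(text: str) -> tuple[str, str]:
--     parts = parse_str_list(text)
--     if not parts:
--         return "", ""
--     # Canonicalize to avoid exp-name collisions due to ordering/duplicates.
--     seen: set[str] = set()
--     parts = [p for p in parts if not (p in seen or seen.add(p))]
--     known_order = ["scale", "log_scale", "points", "log_points", "objects_used"]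
--     rank = {name: i for i, name in enumerate(known_order)}
--     parts = sorted(parts, key=lambda p: (0, rank[p]) if p in rank else (1, p))
--     canon = ",".join(parts)
--     abbrev = {
--         "scale": "sc",
--         "log_scale": "lsc",
--         "points": "pts",
--         "log_points": "lpts",
--         "objects_used": "ou",
--     }
--     tags: list[str] = []
--     for p in parts:
--         safe = "".join(ch for ch in p.lower() if ch.isalnum() or ch in {"_", "-"})
--         tags.append(abbrev.get(p, safe[:12] or "x"))
--     tag = "xf" + "_".join(tags)
--     return canon, tag
-- ===== SOURCE B (Python) =====
-- def parse_str_list(text: str) -> list[str]: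
--     s = str(text or "").strip()
--     if not s:
--         return []
--     return [p.strip() for p in s.split(",") if p.strip()]
--
-- def normalize_extra_features(text: str) -> tuple[str, str]:
--     # Single online pass: each part is inserted into its sorted position in
--     # `ordered` (duplicates detected by key equality and skipped), so the
--     # dedupe set, the rank dict and the sorted() call all disappear.
--     parts = parse_str_list(text)
--     if not parts:
--         return "", ""
--     known_order = ["scale", "log_scale", "points", "log_points", "objects_used"]
--
--     def key(p: str):
--         return (0, known_order.index(p)) if p in known_order else (1, p)
--
--     ordered: list[str] = []
--     for p in parts:
--         k = key(p)
--         i = 0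
--         while i < len(ordered) and key(ordered[i]) < k:
--             i += 1
--         if i < len(ordered) and key(ordered[i]) == k:
--             continue  # duplicate
--         ordered.insert(i, p)
--
--     abbrev = {
--         "scale": "sc",
--         "log_scale": "lsc",
--         "points": "pts",
--         "log_points": "lpts",
--         "objects_used": "ou",
--     }
--
--     def tag_of(p: str) -> str:
--         if p in abbrev:
--             return abbrev[p]
--         safe = "".join(ch for ch in p.lower() if ch.isalnum() or ch in "_-")
--         return safe[:12] or "x"
--
--     return ",".join(ordered), "xf" + "_".join(tag_of(p) for p in ordered)
-- ===== Notes on version B (the rewrite author's own statement) =====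
-- stated objective: alternative
-- what changed: A dedupes with a seen-set comprehension, builds a rank dict and calls sorted() with a partitioning tuple key; B makes a single online pass that inserts each part at its sorted position in the accumulator, detecting duplicates by key equality during the scan, so the set, the rank dict and the sorted() call disappear.
import Mathlib
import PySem

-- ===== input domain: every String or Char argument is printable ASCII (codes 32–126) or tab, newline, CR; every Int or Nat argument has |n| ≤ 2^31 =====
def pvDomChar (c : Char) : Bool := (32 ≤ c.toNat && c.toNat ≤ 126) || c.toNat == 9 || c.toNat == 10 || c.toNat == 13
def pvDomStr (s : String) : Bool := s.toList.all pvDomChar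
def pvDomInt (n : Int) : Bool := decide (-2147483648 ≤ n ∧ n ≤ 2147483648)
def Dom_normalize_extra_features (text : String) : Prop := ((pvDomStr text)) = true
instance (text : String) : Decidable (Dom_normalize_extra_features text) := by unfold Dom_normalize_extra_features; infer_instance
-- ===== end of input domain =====

-- B replaces A's dedupe-set + rank-dict + sorted() pipeline by one online pass that inserts each
-- part at its sorted position, skipping duplicates on key equality (objective: alternative).

-- ===== PORT A =====
-- shared module helper parse_str_list (identical in Source A and Source B)
def pvParseStrList (text : String) : List String :=
  let s := PySem.Str.strip text    -- str(text or "").strip(): for a str argument, 'text or ""' is text (or "" which strips to "")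
  if s = "" then []
  else (((PySem.Str.split? s ",").getD []).map PySem.Str.strip).filter (fun p => p ≠ "")

def pvKnownOrder : List String := ["scale", "log_scale", "points", "log_points", "objects_used"]

-- rank = {name: i for i, name in enumerate(known_order)}
def pvRank : PySem.Dict String Int :=
  (PySem.List.enumerate pvKnownOrder).foldl (fun d iv => PySem.Dict.insert d iv.2 iv.1) PySem.Dict.empty

-- hand port of the tuple sort key (0, rank[p]) / (1, p): encoded as a single List Char
-- '0' :: the-digit-char-of-rank  /  '1' :: p; EXACT because ranks are the single digits 0–4 and '0' < '1',
-- so lexicographic compare of these lists equals Python's tuple compare on every pair of keys.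
def pvKeyA (p : String) : List Char :=
  if PySem.Dict.contains pvRank p
  then ['0', Char.ofNat (48 + (PySem.Dict.getD pvRank p 0).toNat)]
  else '1' :: p.toList

-- the abbrev dict literal (identical in Source A and Source B)
def pvAbbrev : PySem.Dict String String :=
  PySem.Dict.ofList [("scale", "sc"), ("log_scale", "lsc"), ("points", "pts"), ("log_points", "lpts"), ("objects_used", "ou")]

-- '"".join(ch for ch in p.lower() if ch.isalnum() or ch in {"_","-"})[:12] or "x"'
-- (identical expression in Source A and in Source B's tag_of fallback)
def pvSafeTag (p : String) : String :=
  let safe := (PySem.Chars.lower p.toList).filter (fun ch => PySem.Chars.isalnum ch || ch == '_' || ch == '-')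
  let cut := PySem.List.slice safe none (some 12)
  if cut = [] then "x" else String.ofList cut

def normalize_extra_features (text : String) : String × String :=
  let parts0 := pvParseStrList text
  if parts0 = [] then ("", "")
  else
    -- seen-set dedup comprehension, ported as a fold over (seen, kept)
    let parts1 := (parts0.foldl (fun (st : PySem.Set String × List String) p =>
        if PySem.Set.contains st.1 p then st else (PySem.Set.add st.1 p, st.2 ++ [p]))
        (PySem.Set.empty, [])).2
    let parts2 := PySem.List.sorted parts1 pvKeyA
    let canon := PySem.Str.join "," parts2
    let tags := parts2.foldl (fun acc p => acc ++ [(PySem.Dict.get? pvAbbrev p).getD (pvSafeTag p)]) []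
    (canon, "xf" ++ PySem.Str.join "_" tags)

-- ===== PORT B =====
-- Source B's key(p) = (0, known_order.index(p)) if p in known_order else (1, p): the same List Char
-- tuple encoding as pvKeyA (exact for the same reason), computed from known_order.index via idxOf?.
def pvKeyB (p : String) : List Char :=
  match pvKnownOrder.idxOf? p with
  | some i => ['0', Char.ofNat (48 + i)]
  | none => '1' :: p.toList

-- Source B's inner while/insert: walk past smaller keys, skip on key equality, insert before larger
def pvInsertDedup : List String → String → List String
  | [], p => [p]
  | q :: t, p =>
    if pvKeyB q < pvKeyB p then q :: pvInsertDedup t p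
    else if pvKeyB q = pvKeyB p then q :: t
    else p :: q :: t

def pvTagOf (p : String) : String :=
  if PySem.Dict.contains pvAbbrev p then (PySem.Dict.get? pvAbbrev p).getD "" else pvSafeTag p

def normalize_extra_features_alt (text : String) : String × String :=
  let parts := pvParseStrList text
  if parts = [] then ("", "")
  else
    let ordered := parts.foldl pvInsertDedup []
    (PySem.Str.join "," ordered, "xf" ++ PySem.Str.join "_" (ordered.map pvTagOf))

-- ===== PRECONDITION & SPEC =====
def Spec_normalize_extra_features (text : String) (out : String × String) : Prop := out = normalize_extra_features_alt text
instance (text : String) (out : String × String) : Decidable (Spec_normalize_extra_features text out) := by unfold Spec_normalize_extra_features; infer_instance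

-- ===== CLAIM (what is proved, stated in full; the proofs are below) =====
def Claim_equal_normalize_extra_features : Prop := ∀ (text : String), Dom_normalize_extra_features text → Spec_normalize_extra_features text (normalize_extra_features text)

-- ===== LEMMAS AND PROOFS =====

-- the two key functions agree pointwise
theorem pvRank_eq : pvRank = PySem.Dict.mk
    [("scale", (0:Int)), ("log_scale", 1), ("points", 2), ("log_points", 3), ("objects_used", 4)] := by decide

theorem pvRank_contains (p : String) :
    PySem.Dict.contains pvRank p = pvKnownOrder.contains p := by
  rw [pvRank_eq, Bool.eq_iff_iff]
  simp [PySem.Dict.contains_mk, pvKnownOrder]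
  constructor <;> (rintro (h | h | h | h | h) <;> simp [h])

theorem pvKeyA_eq_pvKeyB (p : String) : pvKeyA p = pvKeyB p := by
  by_cases h : p ∈ pvKnownOrder
  · fin_cases h <;> decide
  · have h1 : PySem.Dict.contains pvRank p = false := by
      rw [pvRank_contains]; simpa using h
    have h2 : pvKnownOrder.idxOf? p = none := by
      simpa [List.idxOf?_eq_none_iff] using h
    simp [pvKeyA, pvKeyB, h1, h2]

theorem pvKeyB_inj (a b : String) (h : pvKeyB a = pvKeyB b) : a = b := by
  unfold pvKeyB at h
  cases ha : pvKnownOrder.idxOf? a <;> cases hb : pvKnownOrder.idxOf? b <;>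
    rw [ha, hb] at h
  · -- both unknown
    have := List.cons.inj h
    exact String.toList_inj.mp this.2
  · exact absurd (List.cons.inj h).1 (by decide)
  · exact absurd (List.cons.inj h).1 (by decide)
  · -- both known: indices equal, hence same element of the nodup list
    rename_i i j
    obtain ⟨hi, hai, -⟩ := List.idxOf?_eq_some_iff.mp ha
    obtain ⟨hj, hbj, -⟩ := List.idxOf?_eq_some_iff.mp hb
    have hij : i = j := by
      have hc : Char.ofNat (48 + i) = Char.ofNat (48 + j) := (List.cons.inj (List.cons.inj h).2).1
      have hlen : pvKnownOrder.length = 5 := by decide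
      rw [hlen] at hi hj
      interval_cases i <;> interval_cases j <;> first | rfl | (exfalso; exact absurd hc (by decide))
    subst hij
    rw [← hai, ← hbj]

theorem pvMem_insertDedup (l : List String) (p x : String) :
    x ∈ pvInsertDedup l p ↔ x ∈ l ∨ x = p := by
  induction l with
  | nil => simp [pvInsertDedup]
  | cons q t ih =>
    unfold pvInsertDedup
    split_ifs with h1 h2
    · simp [ih]; tauto
    · have : q = p := pvKeyB_inj q p h2
      subst this
      simp; tauto
    · simp; tauto

theorem pvPairwise_insertDedup (l : List String) (p : String)
    (hl : l.Pairwise (fun a b => pvKeyB a < pvKeyB b)) :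
    (pvInsertDedup l p).Pairwise (fun a b => pvKeyB a < pvKeyB b) := by
  induction l with
  | nil => simp [pvInsertDedup]
  | cons q t ih =>
    rw [List.pairwise_cons] at hl
    obtain ⟨hq, ht⟩ := hl
    unfold pvInsertDedup
    split_ifs with h1 h2
    · rw [List.pairwise_cons]
      refine ⟨?_, ih ht⟩
      intro x hx
      rcases (pvMem_insertDedup t p x).mp hx with hx | hx
      · exact hq x hx
      · subst hx; exact h1
    · exact List.pairwise_cons.mpr ⟨hq, ht⟩
    · have hpq : pvKeyB p < pvKeyB q := lt_of_le_of_ne (not_lt.mp h1) (fun e => h2 e.symm)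
      rw [List.pairwise_cons]
      refine ⟨?_, List.pairwise_cons.mpr ⟨hq, ht⟩⟩
      intro x hx
      rcases List.mem_cons.mp hx with hx | hx
      · subst hx; exact hpq
      · exact lt_trans hpq (hq x hx)

theorem pvFoldl_insertDedup (parts : List String) (acc : List String)
    (hacc : acc.Pairwise (fun a b => pvKeyB a < pvKeyB b)) :
    (parts.foldl pvInsertDedup acc).Pairwise (fun a b => pvKeyB a < pvKeyB b) ∧
    (∀ x, x ∈ parts.foldl pvInsertDedup acc ↔ x ∈ acc ∨ x ∈ parts) := by
  induction parts generalizing acc with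
  | nil => simpa using hacc
  | cons p t ih =>
    obtain ⟨h1, h2⟩ := ih (pvInsertDedup acc p) (pvPairwise_insertDedup acc p hacc)
    refine ⟨h1, fun x => ?_⟩
    rw [List.foldl_cons, h2 x, pvMem_insertDedup]
    simp; tauto

-- A's sorted dedup equals B's online insertion result
theorem pvOrdered_eq (parts : List String) :
    PySem.List.sorted (PySem.List.dedup parts) pvKeyA = parts.foldl pvInsertDedup [] := by
  obtain ⟨hpw, hmem⟩ := pvFoldl_insertDedup parts [] (by simp)
  have hnodup : (parts.foldl pvInsertDedup []).Nodup :=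
    hpw.imp (fun {a b} h e => absurd (congrArg pvKeyB e) (ne_of_lt h))
  have hperm : (parts.foldl pvInsertDedup []).Perm (PySem.List.dedup parts) := by
    rw [List.perm_ext_iff_of_nodup hnodup (PySem.List.nodup_dedup parts)]
    intro x
    rw [hmem x, PySem.List.mem_dedup]
    simp
  have hpwA : (parts.foldl pvInsertDedup []).Pairwise (fun a b => pvKeyA a < pvKeyA b) :=
    hpw.imp (fun {a b} h => by rw [pvKeyA_eq_pvKeyB, pvKeyA_eq_pvKeyB]; exact h)
  have h := PySem.List.sorted_eq_of_perm_of_pairwise_lt (PySem.List.dedup parts)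
    (parts.foldl pvInsertDedup []) pvKeyA hperm hpwA
  convert h using 2

-- the value of A's seen-set dedup loop
def pvPd (s : PySem.Set String) : List String → List String
  | [] => []
  | p :: t => if PySem.Set.contains s p then pvPd s t else p :: pvPd (PySem.Set.add s p) t

theorem pvPd_foldl (l : List String) (s : PySem.Set String) (acc : List String) :
    (l.foldl (fun (st : PySem.Set String × List String) p =>
        if PySem.Set.contains st.1 p then st else (PySem.Set.add st.1 p, st.2 ++ [p])) (s, acc)).2
      = acc ++ pvPd s l := by
  induction l generalizing s acc with
  | nil => simp [pvPd]
  | cons p t ih =>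
    by_cases hc : p ∈ s
    · simpa [pvPd, List.foldl_cons, PySem.Set.contains, hc] using ih s acc
    · simpa [pvPd, List.foldl_cons, PySem.Set.contains, hc] using ih (PySem.Set.add s p) (acc ++ [p])

theorem pvFoldl_add (l : List String) (s : PySem.Set String) :
    l.foldl PySem.Set.add s = s ++ pvPd s l := by
  induction l generalizing s with
  | nil => simp [pvPd]
  | cons p t ih =>
    by_cases hc : p ∈ s
    · have hadd : PySem.Set.add s p = s := by simp [PySem.Set.add, PySem.Set.contains, hc]
      simpa [pvPd, List.foldl_cons, hadd, PySem.Set.contains, hc] using ih s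
    · have hadd : PySem.Set.add s p = s ++ [p] := by simp [PySem.Set.add, PySem.Set.contains, hc]
      simpa [pvPd, List.foldl_cons, hadd, PySem.Set.contains, hc] using ih (s ++ [p])

theorem pvPd_eq_dedup (l : List String) : pvPd PySem.Set.empty l = PySem.List.dedup l := by
  have h' : PySem.List.dedup l = l.foldl PySem.Set.add PySem.Set.empty := by
    rw [PySem.List.dedup_eq_ofList, PySem.Set.ofList_eq_foldl]; rfl
  rw [h', pvFoldl_add l PySem.Set.empty]
  simp [PySem.Set.empty]

theorem pvTag_eq (p : String) :
    (PySem.Dict.get? pvAbbrev p).getD (pvSafeTag p) = pvTagOf p := by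
  unfold pvTagOf
  rw [PySem.Dict.contains_eq_isSome_get?]
  cases h : PySem.Dict.get? pvAbbrev p <;> simp

-- ===== VERDICT (by name: the statement is the Claim_ definition above) =====
theorem normalize_extra_features_spec : Claim_equal_normalize_extra_features := by
  intro text _
  unfold Spec_normalize_extra_features normalize_extra_features normalize_extra_features_alt
  by_cases h0 : pvParseStrList text = []
  · simp [h0]
  · simp only [h0, reduceIte]
    have hded : (((pvParseStrList text).foldl (fun (st : PySem.Set String × List String) p =>
        if PySem.Set.contains st.1 p then st else (PySem.Set.add st.1 p, st.2 ++ [p]))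
        (PySem.Set.empty, [])).2) = PySem.List.dedup (pvParseStrList text) := by
      rw [pvPd_foldl, pvPd_eq_dedup]; simp
    rw [hded, pvOrdered_eq, PySem.List.foldl_append_singleton_eq_map]
    simp [pvTag_eq]
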